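-- pv_equiv track=rewrite | github.com/KingICCrab/pim_mapper | debug_new_formula.py | compute_crossing_counts
-- ===== SOURCE A (Python) =====
-- import math
--
-- def compute_crossing_counts(block_size, tile_size, step, num_tiles):
--     """
--     计算 crossing 和 non-crossing tile 数量
--     使用 GCD 周期方法
--     """
--     if block_size <= 0 or tile_size <= 0 or step <= 0 or num_tiles <= 0:
--         return 0, 0
--
--     # 如果 tile > block，全部 crossing
--     if tile_size > block_size:
--         return 0, num_tiles  # h_non=0, h_crossing=num_tiles
--
--     g = math.gcd(step, block_size)
--     period = block_size // g
--
--     # 计算一个周期内的 crossing 位置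
--     crossing_in_period = 0
--     for k in range(period):
--         pos = (k * step) % block_size
--         if pos + tile_size > block_size:
--             crossing_in_period += 1
--
--     non_crossing_in_period = period - crossing_in_period
--
--     # 分解为完整周期 + 余数
--     num_complete_periods = num_tiles // period
--     remainder = num_tiles % period
--
--     # 余数部分
--     crossing_in_remainder = 0
--     for k in range(remainder):
--         pos = (k * step) % block_size
--         if pos + tile_size > block_size:
--             crossing_in_remainder += 1
--
--     non_crossing_in_remainder = remainder - crossing_in_remainder
--
--     h_non = num_complete_periods * non_crossing_in_period + non_crossing_in_remainder
--     h_crossing = num_complete_periods * crossing_in_period + crossing_in_remainder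
--
--     return h_non, h_crossing
-- ===== SOURCE B (Python) =====
-- def _floor_sum(n, m, a, b):
--     # sum of (a*i + b) // m for i in range(n); requires m > 0, a >= 0, b >= 0
--     if n <= 0 or m <= 0:
--         return 0
--     ans = (a // m) * (n * (n - 1) // 2) + (b // m) * n
--     a %= m
--     b %= m
--     if a == 0:
--         return ans
--     y = (a * (n - 1) + b) // m
--     if y <= 0:
--         return ans
--     return ans + y * (n - 1) - _floor_sum(y, a, m, m - b - 1)
--
--
-- def compute_crossing_counts(block_size, tile_size, step, num_tiles):
--     if block_size <= 0 or tile_size <= 0 or step <= 0 or num_tiles <= 0: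
--         return 0, 0
--     if tile_size > block_size:
--         return 0, num_tiles
--     # tile k crosses a block boundary iff a multiple of block_size lies in
--     # (k*step mod block, k*step mod block + tile_size), i.e. the floor quotient
--     # of (k*step + tile_size - 1) exceeds that of k*step.
--     crossing = (_floor_sum(num_tiles, block_size, step, tile_size - 1)
--                 - _floor_sum(num_tiles, block_size, step, 0))
--     return num_tiles - crossing, crossing
-- ===== Notes on version B (the rewrite author's own statement) =====
-- stated objective: faster
-- what changed: Replaces the gcd-period enumeration (two O(block_size/gcd)-length loops testing each tile position) by a closed floor-sum identity: the crossing count over all num_tiles tiles is floor_sum(n,m,step,tile_size-1)-floor_sum(n,m,step,0), computed with the Euclid-style floor_sum recursion.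
import Mathlib
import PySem

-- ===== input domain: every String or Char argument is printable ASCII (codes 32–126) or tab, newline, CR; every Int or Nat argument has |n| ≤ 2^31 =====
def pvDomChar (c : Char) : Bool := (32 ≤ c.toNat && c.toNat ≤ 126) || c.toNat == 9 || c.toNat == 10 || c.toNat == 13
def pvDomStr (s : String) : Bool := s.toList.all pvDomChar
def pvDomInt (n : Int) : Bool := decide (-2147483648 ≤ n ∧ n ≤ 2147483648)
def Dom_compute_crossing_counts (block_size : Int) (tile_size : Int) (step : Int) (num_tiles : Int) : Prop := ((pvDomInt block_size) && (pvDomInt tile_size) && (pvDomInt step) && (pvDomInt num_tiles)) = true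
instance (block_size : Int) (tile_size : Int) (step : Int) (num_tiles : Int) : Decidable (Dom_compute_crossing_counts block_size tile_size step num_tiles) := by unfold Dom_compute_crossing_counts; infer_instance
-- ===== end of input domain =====

-- B replaces A's two O(block_size/gcd)-length position-enumeration loops by a floor-sum
-- identity evaluated with a Euclid-style recursion (objective: faster).
-- Python A returns a 2-tuple; per the task signature both ports return the 2-element list.

-- ===== PORT A =====
def compute_crossing_counts (block_size : Int) (tile_size : Int) (step : Int) (num_tiles : Int) : List Int :=
  if block_size ≤ 0 ∨ tile_size ≤ 0 ∨ step ≤ 0 ∨ num_tiles ≤ 0 then [0, 0]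
  else if tile_size > block_size then [0, num_tiles]
  else
    let g : Int := (Int.gcd step block_size : Int)   -- math.gcd (gcd of absolute values, nonneg)
    let period := PySem.Int.floordiv block_size g
    let crossing_in_period := (PySem.List.pyRange 0 period 1).foldl (fun c k =>
      if PySem.Int.mod (k * step) block_size + tile_size > block_size then c + 1 else c) 0
    let non_crossing_in_period := period - crossing_in_period
    let num_complete_periods := PySem.Int.floordiv num_tiles period
    let remainder := PySem.Int.mod num_tiles period
    let crossing_in_remainder := (PySem.List.pyRange 0 remainder 1).foldl (fun c k =>
      if PySem.Int.mod (k * step) block_size + tile_size > block_size then c + 1 else c) 0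
    let non_crossing_in_remainder := remainder - crossing_in_remainder
    [num_complete_periods * non_crossing_in_period + non_crossing_in_remainder,
     num_complete_periods * crossing_in_period + crossing_in_remainder]

-- ===== PORT B =====
-- _floor_sum from Source B: sum of (a*i + b) // m for i in range(n)
def floorSumB (n m a b : Int) : Int :=
  if _h : n ≤ 0 ∨ m ≤ 0 then 0
  else
    let ans := PySem.Int.floordiv a m * PySem.Int.floordiv (n * (n - 1)) 2 + PySem.Int.floordiv b m * n
    let a' := PySem.Int.mod a m
    let b' := PySem.Int.mod b m
    if _h2 : a' = 0 then ans
    else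
      let y := PySem.Int.floordiv (a' * (n - 1) + b') m
      if y ≤ 0 then ans
      else ans + y * (n - 1) - floorSumB y a' m (m - b' - 1)
termination_by m.toNat
decreasing_by
  have hm : 0 < m := by omega
  have h2 : PySem.Int.mod a m < m := PySem.Int.mod_lt a hm
  omega

def compute_crossing_counts_alt (block_size : Int) (tile_size : Int) (step : Int) (num_tiles : Int) : List Int :=
  if block_size ≤ 0 ∨ tile_size ≤ 0 ∨ step ≤ 0 ∨ num_tiles ≤ 0 then [0, 0]
  else if tile_size > block_size then [0, num_tiles]
  else
    let crossing := floorSumB num_tiles block_size step (tile_size - 1)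
                    - floorSumB num_tiles block_size step 0
    [num_tiles - crossing, crossing]

-- ===== PRECONDITION & SPEC =====
def Spec_compute_crossing_counts (block_size : Int) (tile_size : Int) (step : Int) (num_tiles : Int) (out : List Int) : Prop := out = compute_crossing_counts_alt block_size tile_size step num_tiles
instance (block_size : Int) (tile_size : Int) (step : Int) (num_tiles : Int) (out : List Int) : Decidable (Spec_compute_crossing_counts block_size tile_size step num_tiles out) := by unfold Spec_compute_crossing_counts; infer_instance

-- ===== CLAIM (what is proved, stated in full; the proofs are below) =====
def Claim_equal_compute_crossing_counts : Prop := ∀ (block_size : Int) (tile_size : Int) (step : Int) (num_tiles : Int), Dom_compute_crossing_counts block_size tile_size step num_tiles → Spec_compute_crossing_counts block_size tile_size step num_tiles (compute_crossing_counts block_size tile_size step num_tiles)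

-- ===== LEMMAS AND PROOFS =====

-- Mathematical floor sum: ∑_{i<n} (a*i+b)/m  (Int '/' = Python '//' for m > 0)
def FS (m a b : Int) (n : Nat) : Int := ∑ i ∈ Finset.range n, (a * (i : Int) + b) / m

-- Crossing count: number of k < r with (k*s) % m + t > m
def CC (m t s : Int) (r : Nat) : Int :=
  ∑ k ∈ Finset.range r, (if ((k : Int) * s) % m + t > m then (1 : Int) else 0)

lemma gauss (n : Nat) : ∑ i ∈ Finset.range n, (i : Int) = (n : Int) * ((n : Int) - 1) / 2 := by
  have h2 : ∑ i ∈ Finset.range n, (2 : Int) * (i : Int) = (n : Int) * ((n : Int) - 1) := by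
    induction n with
    | zero => simp
    | succ k ih => rw [Finset.sum_range_succ, ih]; push_cast; ring
  rw [← Finset.mul_sum] at h2
  omega

lemma FS_mod (m a b : Int) (hm : 0 < m) (n : Nat) :
    FS m a b n = (a / m) * (∑ i ∈ Finset.range n, (i : Int)) + (b / m) * n + FS m (a % m) (b % m) n := by
  unfold FS
  have key : ∀ i ∈ Finset.range n, (a * (i:Int) + b) / m
      = ((a / m) * (i:Int) + (b / m)) + ((a % m) * (i:Int) + (b % m)) / m := by
    intro i _
    have h : a * (i:Int) + b = ((a % m) * i + (b % m)) + m * ((a / m) * i + (b / m)) := by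
      nlinarith [Int.mul_ediv_add_emod a m, Int.mul_ediv_add_emod b m]
    rw [h, Int.add_mul_ediv_left _ _ (by omega : m ≠ 0)]
    ring
  rw [Finset.sum_congr rfl key, Finset.sum_add_distrib, Finset.sum_add_distrib,
    Finset.sum_const, Finset.card_range, ← Finset.mul_sum]
  ring

lemma FS_zero_left (m b : Int) (hb0 : 0 ≤ b) (hb : b < m) (n : Nat) : FS m 0 b n = 0 := by
  unfold FS
  refine Finset.sum_eq_zero fun i _ => ?_
  rw [zero_mul, zero_add]
  exact Int.ediv_eq_zero_of_lt hb0 hb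

lemma FS_eq_zero_of_ymax_nonpos (m a b : Int) (hm : 0 < m) (ha : 0 ≤ a) (hb : 0 ≤ b) (n : Nat)
    (hy : (a * ((n : Int) - 1) + b) / m ≤ 0) : FS m a b n = 0 := by
  unfold FS
  refine Finset.sum_eq_zero fun i hi => ?_
  have hi' : (i : Int) ≤ (n : Int) - 1 := by
    have := Finset.mem_range.mp hi; omega
  have h1 : (0:Int) ≤ (a * (i:Int) + b) / m := Int.ediv_nonneg (by positivity) (by omega)
  have h2 : (a * (i:Int) + b) / m ≤ (a * ((n:Int) - 1) + b) / m :=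
    Int.ediv_le_ediv hm (by nlinarith)
  omega

-- the swap identity (hyperbola-flip step of the Euclid-like floor sum)
lemma FS_swap (m a b : Int) (hm : 0 < m) (ha0 : 0 < a) (ha : a < m) (hb0 : 0 ≤ b) (hb : b < m)
    (n : Nat) (hn : 1 ≤ n) :
    FS m a b n = ((a * ((n : Int) - 1) + b) / m) * ((n : Int) - 1)
      - FS a m (m - b - 1) ((a * ((n : Int) - 1) + b) / m).toNat := by
  induction n, hn using Nat.le_induction with
  | base =>
    have h0 : (a * ((1:Nat) - 1 : Int) + b) / m = 0 := by
      norm_num; exact Int.ediv_eq_zero_of_lt hb0 hb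
    rw [h0]
    simp [FS, Int.ediv_eq_zero_of_lt hb0 hb]
  | succ n hn1 ih =>
    have hcast : ((n + 1 : Nat) : Int) - 1 = (n : Int) := by push_cast; ring
    rw [hcast]
    set y : Int := (a * ((n : Int) - 1) + b) / m with hy
    set y' : Int := (a * (n : Int) + b) / m with hy'
    have hyn : 0 ≤ y := Int.ediv_nonneg (by nlinarith) (by omega)
    have hmono : y ≤ y' := Int.ediv_le_ediv hm (by nlinarith)
    have hstep : y' ≤ y + 1 := by
      have h1 : a * (n:Int) + b ≤ (a * ((n:Int)-1) + b) + m := by nlinarith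
      have h2 : ((a * ((n:Int)-1) + b) + m) / m = y + 1 := by
        rw [show (a * ((n:Int)-1) + b) + m = (a * ((n:Int)-1) + b) + 1 * m by ring,
          Int.add_mul_ediv_right _ _ (by omega : m ≠ 0), hy]
      calc y' ≤ ((a * ((n:Int)-1) + b) + m) / m := Int.ediv_le_ediv hm h1
        _ = y + 1 := h2
    have hFSsucc : FS m a b (n+1) = FS m a b n + y' := by
      unfold FS; rw [Finset.sum_range_succ]
    rw [hFSsucc, ih]
    rcases (by omega : y' = y ∨ y' = y + 1) with hcase | hcase
    · rw [hcase]; ring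
    · have hyt : (y + 1).toNat = y.toNat + 1 := by omega
      have hyc : ((y.toNat : Int)) = y := by omega
      have hT : FS a m (m - b - 1) ((y+1).toNat)
          = FS a m (m - b - 1) (y.toNat) + (m * y + (m - b - 1)) / a := by
        unfold FS; rw [hyt, Finset.sum_range_succ, hyc]
      have hub : (y+1) * m ≤ a * (n:Int) + b := by
        nlinarith [Int.emod_nonneg (a * (n:Int) + b) (by omega : m ≠ 0),
          Int.mul_ediv_add_emod (a * (n:Int) + b) m, hcase]
      have hlb : a * ((n:Int)-1) + b < (y+1) * m := by
        nlinarith [Int.emod_lt_of_pos (a * ((n:Int)-1) + b) hm,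
          Int.mul_ediv_add_emod (a * ((n:Int)-1) + b) m]
      have hrow : (m * y + (m - b - 1)) / a = (n:Int) - 1 := by
        have hle : (n:Int) - 1 ≤ (m * y + (m - b - 1)) / a := by
          rw [Int.le_ediv_iff_mul_le ha0]; nlinarith
        have hlt : (m * y + (m - b - 1)) / a < (n:Int) := by
          rw [Int.ediv_lt_iff_lt_mul ha0]; nlinarith
        omega
      rw [hcase, hT, hrow]
      ring

lemma floorSumB_correct (K : Nat) : ∀ (m : Int), m.toNat ≤ K → ∀ (a b n : Int), 0 < m → 0 ≤ a → 0 ≤ b →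
    floorSumB n m a b = FS m a b n.toNat := by
  induction K with
  | zero => intro m hK a b n hm ha hb; omega
  | succ K ih =>
    intro m hK a b n hm ha hb
    rw [floorSumB]
    by_cases hn : n ≤ 0 ∨ m ≤ 0
    · have hn0 : n ≤ 0 := by omega
      simp only [dif_pos hn]
      have : n.toNat = 0 := by omega
      rw [this]; simp [FS]
    · simp only [dif_neg hn]
      have hn1 : 1 ≤ n := by omega
      have hnc : ((n.toNat : Int)) = n := by omega
      have hnt : 1 ≤ n.toNat := by omega
      set a' := PySem.Int.mod a m with ha'
      set b' := PySem.Int.mod b m with hb'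
      have ha'e : a' = a % m := PySem.Int.mod_eq_emod_of_pos hm
      have hb'e : b' = b % m := PySem.Int.mod_eq_emod_of_pos hm
      have ha'0 : 0 ≤ a' := PySem.Int.mod_nonneg a hm
      have ha'm : a' < m := PySem.Int.mod_lt a hm
      have hb'0 : 0 ≤ b' := PySem.Int.mod_nonneg b hm
      have hb'm : b' < m := PySem.Int.mod_lt b hm
      have hdiv2 : PySem.Int.floordiv (n * (n - 1)) 2 = (n * (n-1)) / 2 :=
        PySem.Int.floordiv_eq_ediv_of_pos (by omega)
      have hansE : PySem.Int.floordiv a m * PySem.Int.floordiv (n * (n - 1)) 2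
          + PySem.Int.floordiv b m * n
          = (a / m) * (∑ i ∈ Finset.range n.toNat, (i : Int)) + (b / m) * n := by
        rw [hdiv2, PySem.Int.floordiv_eq_ediv_of_pos hm, PySem.Int.floordiv_eq_ediv_of_pos hm,
          gauss, hnc]
      have hFSm := FS_mod m a b hm n.toNat
      rw [hnc] at hFSm
      by_cases hz : a' = 0
      · simp only [dif_pos hz]
        rw [hansE, hFSm, ← ha'e, ← hb'e, hz, FS_zero_left m b' hb'0 hb'm]
        ring
      · simp only [dif_neg hz]
        have hy : PySem.Int.floordiv (a' * (n - 1) + b') m = (a' * (n - 1) + b') / m :=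
          PySem.Int.floordiv_eq_ediv_of_pos hm
        by_cases hyle : PySem.Int.floordiv (a' * (n - 1) + b') m ≤ 0
        · simp only [if_pos hyle]
          rw [hy] at hyle
          have h0 : FS m a' b' n.toNat = 0 := by
            apply FS_eq_zero_of_ymax_nonpos m a' b' hm ha'0 hb'0 n.toNat
            rw [hnc]; exact hyle
          rw [hansE, hFSm, ← ha'e, ← hb'e, h0]; ring
        · simp only [if_neg hyle]
          rw [hy] at hyle ⊢
          set Y : Int := (a' * (n - 1) + b') / m with hY
          have hswap := FS_swap m a' b' hm (by omega) ha'm hb'0 hb'm n.toNat hnt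
          rw [hnc] at hswap
          have hrec : floorSumB Y a' m (m - b' - 1) = FS a' m (m - b' - 1) Y.toNat := by
            apply ih a' (by omega) m (m - b' - 1) Y (by omega) (by omega) (by omega)
          rw [hansE, hFSm, ← ha'e, ← hb'e, hswap, hrec, hY]
          ring

-- crossing indicator as a difference of floor quotients
lemma indicator_eq (m t x : Int) (hm : 0 < m) (ht0 : 0 < t) (ht : t ≤ m) (_hx : 0 ≤ x) :
    (if x % m + t > m then (1 : Int) else 0) = (x + (t - 1)) / m - x / m := by
  have hu0 : 0 ≤ x % m := Int.emod_nonneg x (by omega)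
  have hum : x % m < m := Int.emod_lt_of_pos x hm
  have hdecomp : x + (t - 1) = (x % m + (t - 1)) + m * (x / m) := by
    nlinarith [Int.mul_ediv_add_emod x m]
  rw [hdecomp, Int.add_mul_ediv_left _ _ (by omega : m ≠ 0)]
  by_cases hc : x % m + t > m
  · have h1 : (x % m + (t - 1)) / m = 1 := by
      have := Int.ediv_eq_zero_of_lt (a := x % m + (t-1) - m) (b := m) (by omega) (by omega)
      have hrw : x % m + (t - 1) = (x % m + (t-1) - m) + 1 * m := by ring
      rw [hrw, Int.add_mul_ediv_right _ _ (by omega : m ≠ 0), this]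
      omega
    simp [hc, h1]
  · have h1 : (x % m + (t - 1)) / m = 0 :=
      Int.ediv_eq_zero_of_lt (by omega) (by omega)
    simp [hc, h1]

lemma CC_eq_FS_sub (m t s : Int) (hm : 0 < m) (ht0 : 0 < t) (ht : t ≤ m) (hs : 0 ≤ s) (r : Nat) :
    CC m t s r = FS m s (t - 1) r - FS m s 0 r := by
  unfold CC FS
  rw [← Finset.sum_sub_distrib]
  refine Finset.sum_congr rfl fun k _ => ?_
  rw [indicator_eq m t ((k:Int)*s) hm ht0 ht (by positivity)]
  rw [show s * (k:Int) = (k:Int) * s by ring]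
  rw [show (k:Int) * s + 0 = (k:Int) * s by ring]

-- periodicity of the crossing indicator
lemma CC_add (m t s : Int) (p : Nat) (hper : (m : Int) ∣ (p : Int) * s) (r : Nat) :
    CC m t s (p + r) = CC m t s p + CC m t s r := by
  unfold CC
  rw [Finset.sum_range_add]
  congr 1
  refine Finset.sum_congr rfl fun k _ => ?_
  obtain ⟨j, hj⟩ := hper
  have h1 : ((p + k : Nat) : Int) * s = (k : Int) * s + m * j := by
    push_cast; rw [← hj]; ring
  rw [h1, Int.add_mul_emod_self_left]

lemma CC_decompose (m t s : Int) (p : Nat) (hper : (m : Int) ∣ (p : Int) * s) (q r : Nat) :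
    CC m t s (q * p + r) = (q : Int) * CC m t s p + CC m t s r := by
  induction q with
  | zero => simp
  | succ q ih =>
    have h1 : (q + 1) * p + r = p + (q * p + r) := by ring
    rw [h1, CC_add m t s p hper, ih]
    push_cast; ring

lemma countP_range_int (q : Nat → Bool) : ∀ N, ((List.range N).countP q : Int)
    = ∑ k ∈ Finset.range N, (if q k then (1:Int) else 0) := by
  intro N
  induction N with
  | zero => simp
  | succ N ih =>
    rw [List.range_succ, List.countP_append, Finset.sum_range_succ, ← ih]
    by_cases h : q N <;> simp [h]

-- A's counting loop is CC
lemma loop_eq_CC (m t s r : Int) (hm : 0 < m) (hr : 0 ≤ r) :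
    (PySem.List.pyRange 0 r 1).foldl (fun c k =>
      if PySem.Int.mod (k * s) m + t > m then c + 1 else c) 0 = CC m t s r.toNat := by
  rw [PySem.List.foldl_ite_add_one, PySem.List.pyRange_one, List.countP_map]
  rw [countP_range_int]
  unfold CC
  rw [show (r - 0).toNat = r.toNat by omega, zero_add]
  apply Finset.sum_congr rfl
  intro k _
  simp only [Function.comp]
  simp only [PySem.Int.mod_eq_emod_of_pos hm, zero_add, decide_eq_true_eq]

-- ===== VERDICT (by name: the statement is the Claim_ definition above) =====
theorem compute_crossing_counts_spec : Claim_equal_compute_crossing_counts := by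
  intro m t s n _hdom
  unfold Spec_compute_crossing_counts
  unfold compute_crossing_counts compute_crossing_counts_alt
  split_ifs with h1 h2
  · rfl
  · rfl
  · simp only [not_or, not_le, not_lt] at h1 h2
    obtain ⟨hm, ht, hs, hn⟩ := h1
    dsimp only
    set g : Int := (Int.gcd s m : Int) with hg
    have hgdm : g ∣ m := Int.gcd_dvd_right s m
    have hgds : g ∣ s := Int.gcd_dvd_left s m
    have hg0 : 0 < g := by
      have : Int.gcd s m ≠ 0 := by
        simp [Int.gcd_eq_zero_iff]; omega
      omega
    have hgm : g ≤ m := Int.le_of_dvd hm hgdm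
    set p : Int := PySem.Int.floordiv m g with hp
    have hpe : p = m / g := PySem.Int.floordiv_eq_ediv_of_pos hg0
    have hp0 : 0 < p := by
      have h1 : (1:Int) ≤ m / g := (Int.le_ediv_iff_mul_le hg0).mpr (by omega)
      omega
    have hper : m ∣ p * s := by
      obtain ⟨s', hs'⟩ := hgds
      rw [hpe, hs', show m / g * (g * s') = (m / g * g) * s' by ring,
        Int.ediv_mul_cancel hgdm]
      exact Dvd.intro s' rfl
    set q : Int := PySem.Int.floordiv n p with hq
    have hqe : q = n / p := PySem.Int.floordiv_eq_ediv_of_pos hp0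
    set r : Int := PySem.Int.mod n p with hr
    have hre : r = n % p := PySem.Int.mod_eq_emod_of_pos hp0
    have hq0 : 0 ≤ q := by rw [hqe]; exact Int.ediv_nonneg (by omega) (by omega)
    have hr0 : 0 ≤ r := by rw [hre]; exact Int.emod_nonneg n (by omega)
    have hrp : r < p := by rw [hre]; exact Int.emod_lt_of_pos n hp0
    have hdecomp : n = p * q + r := by
      rw [hqe, hre]; linarith [Int.mul_ediv_add_emod n p]
    have hNat : n.toNat = q.toNat * p.toNat + r.toNat := by
      have hX : ((q.toNat * p.toNat + r.toNat : Nat) : Int) = ((n.toNat : Nat) : Int) := by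
        push_cast
        rw [Int.toNat_of_nonneg hq0, Int.toNat_of_nonneg hr0,
          Int.toNat_of_nonneg (by omega : (0:Int) ≤ p), Int.toNat_of_nonneg (by omega : (0:Int) ≤ n)]
        rw [hdecomp]; ring
      exact (Int.natCast_inj.mp hX).symm
    rw [loop_eq_CC m t s p hm (by omega), loop_eq_CC m t s r hm hr0]
    rw [floorSumB_correct m.toNat m le_rfl s (t-1) n hm (by omega) (by omega),
      floorSumB_correct m.toNat m le_rfl s 0 n hm (by omega) (by omega)]
    have hcc : FS m s (t - 1) n.toNat - FS m s 0 n.toNat = CC m t s n.toNat :=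
      (CC_eq_FS_sub m t s hm (by omega) (by omega) (by omega) n.toNat).symm
    rw [hcc]
    have hdec2 : CC m t s n.toNat = q * CC m t s p.toNat + CC m t s r.toNat := by
      rw [hNat, CC_decompose m t s p.toNat (by rwa [Int.toNat_of_nonneg (by omega : (0:Int) ≤ p)]) q.toNat r.toNat,
        Int.toNat_of_nonneg hq0]
    rw [hdec2]
    have hpn : p * q + r = n := hdecomp.symm
    rw [show q * (p - CC m t s p.toNat) + (r - CC m t s r.toNat)
        = (p * q + r) - (q * CC m t s p.toNat + CC m t s r.toNat) by ring, hpn]
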